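-- pv_equiv track=rewrite | github.com/Reyshwanth/GPSLAM | slam.py | sign_change_count
-- ===== SOURCE A (Python) =====
-- def sign_change_count(oarray):
--     sign_change=0
--     skip_index=[]
--     for i in range(len(oarray)-1):
--         j=1
--         if i in skip_index:
--             continue
--         while(oarray[i]*oarray[i+j]==0):
--             skip_index.append(i+j)
--             j+=1
--
--         if oarray[i]*oarray[i+j]<0:
--             sign_change+=1
--
--     return sign_change
-- ===== SOURCE B (Python) =====
-- def sign_change_count(oarray):
--     count = 0
--     prev = 0
--     for x in oarray:
--         if x != 0:
--             if prev * x < 0: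
--                 count += 1
--             prev = x
--     return count
-- ===== Notes on version B (the rewrite author's own statement) =====
-- stated objective: faster
-- what changed: Replaced the index loop with an inner while-scan and a growing skip_index list (membership-tested each iteration) by a single pass that tracks the last nonzero value and compares it with each new nonzero element.
import Mathlib
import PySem

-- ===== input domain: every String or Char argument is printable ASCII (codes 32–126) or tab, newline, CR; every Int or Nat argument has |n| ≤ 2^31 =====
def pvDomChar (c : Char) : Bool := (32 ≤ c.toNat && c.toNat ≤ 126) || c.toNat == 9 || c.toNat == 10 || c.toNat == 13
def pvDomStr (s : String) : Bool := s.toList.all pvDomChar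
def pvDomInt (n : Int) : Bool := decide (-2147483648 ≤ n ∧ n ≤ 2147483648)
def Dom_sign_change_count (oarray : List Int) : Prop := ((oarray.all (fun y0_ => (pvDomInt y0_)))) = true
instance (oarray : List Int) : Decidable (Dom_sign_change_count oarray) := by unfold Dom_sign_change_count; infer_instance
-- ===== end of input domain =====

-- B replaces A's quadratic index loop (inner while-scan plus a skip_index membership list)
-- by one linear pass tracking the previous nonzero value; objective: faster (asymptotic).
-- Inside Pre_ (A returns normally) the two agree; outside Pre_ A raises IndexError while B returns.

-- ===== PORT A =====
-- inner `while oarray[i]*oarray[i+j]==0: skip_index.append(i+j); j+=1` loop;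
-- fuel bounds the scan: Python raises IndexError exactly where the bounds check
-- `i + j < arr.length` fails, and those inputs are excluded by Pre_.
def pvAWhile (arr : List Int) (i j : Nat) (skip : List Nat) (fuel : Nat) : Nat × List Nat :=
  match fuel with
  | 0 => (j, skip)
  | f + 1 =>
    if i + j < arr.length then
      if arr.getD i 0 * arr.getD (i + j) 0 = 0 then
        pvAWhile arr i (j + 1) (skip ++ [i + j]) f
      else (j, skip)
    else (j, skip)   -- IndexError in Python; outside Pre_

-- `for i in range(len(oarray)-1)` with state (sign_change, skip_index)
def pvALoop (arr : List Int) (i : Nat) (count : Int) (skip : List Nat) : Int :=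
  if h : i < arr.length - 1 then
    if i ∈ skip then pvALoop arr (i + 1) count skip
    else
      let r := pvAWhile arr i 1 skip arr.length
      let c' := if arr.getD i 0 * arr.getD (i + r.1) 0 < 0 then count + 1 else count
      pvALoop arr (i + 1) c' r.2
  else count
termination_by arr.length - i
decreasing_by all_goals omega

def sign_change_count (oarray : List Int) : Int := pvALoop oarray 0 0 []

-- ===== PORT B =====
def pvBStep (s : Int × Int) (x : Int) : Int × Int :=
  if x ≠ 0 then (if s.2 * x < 0 then s.1 + 1 else s.1, x) else s

def sign_change_count_alt (oarray : List Int) : Int :=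
  (oarray.foldl pvBStep (0, 0)).1

-- ===== PRECONDITION & SPEC =====
-- Pre_ excludes exactly the inputs on which A raises IndexError: lists of length ≥ 2
-- whose first or last element is 0 (the while-scan runs past the end of the array).
def Pre_sign_change_count (oarray : List Int) : Prop :=
  oarray.length ≤ 1 ∨ (oarray.getD 0 0 ≠ 0 ∧ oarray.getD (oarray.length - 1) 0 ≠ 0)
instance (oarray : List Int) : Decidable (Pre_sign_change_count oarray) := by
  unfold Pre_sign_change_count; infer_instance

def pvWitness_sign_change_count : List Int := [1, 0, -2, 3]

def Spec_sign_change_count (oarray : List Int) (out : Int) : Prop := out = sign_change_count_alt oarray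
instance (oarray : List Int) (out : Int) : Decidable (Spec_sign_change_count oarray out) := by unfold Spec_sign_change_count; infer_instance

-- ===== CLAIM (what is proved, stated in full; the proofs are below) =====
def Claim_equal_sign_change_count : Prop := ∀ (oarray : List Int), Dom_sign_change_count oarray → Pre_sign_change_count oarray → Spec_sign_change_count oarray (sign_change_count oarray)

-- ===== LEMMAS AND PROOFS =====

/-- Sign changes along a list, given the previous nonzero value. -/
def pvG (prev : Int) : List Int → Int
  | [] => 0
  | x :: xs => (if prev * x < 0 then 1 else 0) + pvG x xs

def pvFiltNZ (l : List Int) : List Int := l.filter (fun x => decide (x ≠ 0))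

lemma pvB_char (l : List Int) : ∀ (c p : Int),
    (l.foldl pvBStep (c, p)).1 = c + pvG p (pvFiltNZ l) := by
  induction l with
  | nil => intro c p; simp [pvG, pvFiltNZ]
  | cons x xs ih =>
    intro c p
    by_cases hx : x = 0
    · simp only [List.foldl]
      rw [show pvBStep (c, p) x = (c, p) from by simp [pvBStep, hx]]
      simp [pvFiltNZ, hx, ih]
    · simp only [List.foldl]
      rw [show pvBStep (c, p) x = (if p * x < 0 then c + 1 else c, x) from by
        simp [pvBStep, hx]]
      rw [ih]
      have hfc : pvFiltNZ (x :: xs) = x :: pvFiltNZ xs := by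
        simp [pvFiltNZ, hx]
      rw [hfc, pvG]
      split_ifs <;> ring

lemma pvFiltNZ_cons_ne (x : Int) (l : List Int) (hx : x ≠ 0) :
    pvFiltNZ (x :: l) = x :: pvFiltNZ l := by
  simp [pvFiltNZ, hx]

lemma pvFiltNZ_cons_zero (l : List Int) : pvFiltNZ ((0 : Int) :: l) = pvFiltNZ l := by
  simp [pvFiltNZ]

lemma pvAWhile_char (arr : List Int) (i : Nat) (t : Nat)
    (ht : i + t < arr.length) (htnz : arr.getD (i + t) 0 ≠ 0)
    (hnz : arr.getD i 0 ≠ 0) :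
    ∀ (fuel j : Nat) (skip : List Nat), j ≤ t → t - j < fuel →
      (∀ m, j ≤ m → m < t → arr.getD (i + m) 0 = 0) →
      pvAWhile arr i j skip fuel = (t, skip ++ List.range' (i + j) (t - j)) := by
  intro fuel
  induction fuel with
  | zero => intro j skip hj hf hz; omega
  | succ f ih =>
    intro j skip hj hf hz
    rcases Nat.eq_or_lt_of_le hj with rfl | hjt
    · -- j = t: element nonzero, loop stops
      rw [pvAWhile, if_pos ht, if_neg (by
        intro hmul
        rcases mul_eq_zero.mp hmul with h | h
        · exact hnz h
        · exact htnz h)]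
      simp
    · -- j < t: element zero, continue
      have hz0 : arr.getD (i + j) 0 = 0 := hz j le_rfl hjt
      rw [pvAWhile, if_pos (by omega), if_pos (by rw [hz0]; ring)]
      rw [ih (j + 1) (skip ++ [i + j]) (by omega) (by omega)
        (fun m hm1 hm2 => hz m (by omega) hm2)]
      have : t - j = (t - (j + 1)) + 1 := by omega
      rw [this, List.range'_succ]
      simp
      omega

/-- Running the loop over a block of skipped indices does nothing. -/
lemma pvALoop_skip (arr : List Int) (c : Int) (skip : List Nat) :
    ∀ (d m t : Nat), t - m ≤ d → m ≤ t → (∀ x, m ≤ x → x < t → x ∈ skip) →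
      pvALoop arr m c skip = pvALoop arr t c skip := by
  intro d
  induction d with
  | zero =>
    intro m t h1 h2 _
    obtain rfl : m = t := by omega
    rfl
  | succ f ih =>
    intro m t h1 h2 hmem
    rcases Nat.eq_or_lt_of_le h2 with rfl | hmt
    · rfl
    · by_cases hlen : m < arr.length - 1
      · rw [pvALoop, dif_pos hlen, if_pos (hmem m le_rfl hmt)]
        exact ih (m + 1) t (by omega) (by omega) (fun x hx1 hx2 => hmem x (by omega) hx2)
      · rw [pvALoop, dif_neg hlen, pvALoop, dif_neg (by omega)]

lemma pvFiltNZ_drop (arr : List Int) :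
    ∀ (d a b : Nat), b - a ≤ d → a ≤ b → b < arr.length → arr.getD b 0 ≠ 0 →
      (∀ m, a ≤ m → m < b → arr.getD m 0 = 0) →
      pvFiltNZ (arr.drop a) = arr.getD b 0 :: pvFiltNZ (arr.drop (b + 1)) := by
  intro d
  induction d with
  | zero =>
    intro a b h1 h2 hb hnz _
    obtain rfl : a = b := by omega
    rw [List.getD_eq_getElem _ _ hb] at hnz ⊢
    rw [List.drop_eq_getElem_cons hb, pvFiltNZ_cons_ne _ _ hnz]
  | succ f ih =>
    intro a b h1 h2 hb hnz hz
    rcases Nat.eq_or_lt_of_le h2 with rfl | hab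
    · exact ih a a (by omega) le_rfl hb hnz hz
    · have ha : a < arr.length := by omega
      have hz0 : arr[a] = 0 := by
        have := hz a le_rfl hab
        rwa [List.getD_eq_getElem _ _ ha] at this
      have hstep : pvFiltNZ (arr.drop a) = pvFiltNZ (arr.drop (a + 1)) := by
        rw [List.drop_eq_getElem_cons ha, hz0, pvFiltNZ_cons_zero]
      rw [hstep]
      exact ih (a + 1) b (by omega) (by omega) hb hnz
        (fun m hm1 hm2 => hz m (by omega) hm2)

lemma pvALoop_char (arr : List Int) (hlast : arr.getD (arr.length - 1) 0 ≠ 0) :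
    ∀ (d i : Nat) (count : Int) (skip : List Nat), arr.length - i ≤ d →
      i < arr.length → arr.getD i 0 ≠ 0 →
      (∀ k, k ∈ skip ↔ (k ≤ i ∧ arr.getD k 0 = 0)) →
      pvALoop arr i count skip = count + pvG (arr.getD i 0) (pvFiltNZ (arr.drop (i + 1))) := by
  intro d
  induction d with
  | zero => intro i c skip h1 h2; omega
  | succ f ih =>
    intro i count skip hd hi hnz hskip
    by_cases hlen : i < arr.length - 1
    · -- find the next nonzero index i + t
      have hex : ∃ t, 0 < t ∧ arr.getD (i + t) 0 ≠ 0 := by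
        refine ⟨arr.length - 1 - i, by omega, ?_⟩
        have : i + (arr.length - 1 - i) = arr.length - 1 := by omega
        rw [this]; exact hlast
      set t := Nat.find hex with htdef
      obtain ⟨ht0, htnz⟩ : 0 < t ∧ arr.getD (i + t) 0 ≠ 0 := Nat.find_spec hex
      have htle : t ≤ arr.length - 1 - i := Nat.find_min' hex
        ⟨by omega, by rw [show i + (arr.length - 1 - i) = arr.length - 1 by omega]; exact hlast⟩
      have htlt : i + t < arr.length := by omega
      have hz : ∀ m, 1 ≤ m → m < t → arr.getD (i + m) 0 = 0 := by
        intro m hm1 hm2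
        by_contra hc
        exact absurd ⟨by omega, hc⟩ (Nat.find_min hex hm2)
      have hinotskip : i ∉ skip := by
        intro h; exact hnz ((hskip i).mp h).2
      rw [pvALoop, dif_pos hlen, if_neg hinotskip]
      rw [pvAWhile_char arr i t htlt htnz hnz arr.length 1 skip (by omega) (by omega) hz]
      simp only
      set skip' := skip ++ List.range' (i + 1) (t - 1) with hskip'
      have hskipchar : ∀ k, k ∈ skip' ↔ (k ≤ i + t ∧ arr.getD k 0 = 0) := by
        intro k
        rw [hskip', List.mem_append, hskip k, List.mem_range'_1]
        constructor
        · rintro (⟨h1, h2⟩ | ⟨h1, h2⟩)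
          · exact ⟨by omega, h2⟩
          · have : k = i + (k - i) := by omega
            refine ⟨by omega, ?_⟩
            rw [this]; exact hz (k - i) (by omega) (by omega)
        · rintro ⟨h1, h2⟩
          by_cases hki : k ≤ i
          · exact Or.inl ⟨hki, h2⟩
          · right
            have hkne : k ≠ i + t := by
              intro h; rw [h] at h2; exact htnz h2
            omega
      -- skip over the zero block
      rw [pvALoop_skip arr _ skip' t (i + 1) (i + t) (by omega) (by omega)
        (fun x hx1 hx2 => (hskipchar x).mpr
          ⟨by omega, by rw [show x = i + (x - i) by omega]; exact hz (x - i) (by omega) (by omega)⟩)]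
      rw [ih (i + t) _ skip' (by omega) htlt htnz hskipchar]
      rw [pvFiltNZ_drop arr arr.length (i + 1) (i + t) (by omega) (by omega) htlt htnz
        (fun m hm1 hm2 => by
          rw [show m = i + (m - i) by omega]; exact hz (m - i) (by omega) (by omega))]
      rw [pvG]
      split_ifs <;> ring
    · -- i = arr.length - 1: loop ends, suffix empty
      rw [pvALoop, dif_neg hlen]
      have : arr.drop (i + 1) = [] := List.drop_eq_nil_of_le (by omega)
      rw [this]
      simp [pvFiltNZ, pvG]

-- ===== VERDICT (by name: the statement is the Claim_ definition above) =====
theorem sign_change_count_spec : Claim_equal_sign_change_count := by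
  intro arr _ hpre
  unfold Spec_sign_change_count
  rcases hpre with hsmall | ⟨h0, hl⟩
  · -- length ≤ 1
    match arr, hsmall with
    | [], _ =>
      show pvALoop [] 0 0 [] = (([] : List Int).foldl pvBStep (0, 0)).1
      rw [pvALoop]
      simp
    | [x], _ =>
      show pvALoop [x] 0 0 [] = ([x].foldl pvBStep (0, 0)).1
      rw [pvALoop, dif_neg (by simp)]
      simp [pvBStep]
      split_ifs <;> rfl
  · -- length ≥ 2 would follow, but the characterization works for any nonempty list
    have hne : arr ≠ [] := by
      intro h; rw [h] at h0; exact h0 rfl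
    have hlen : 0 < arr.length := List.length_pos_iff.mpr hne
    show pvALoop arr 0 0 [] = (arr.foldl pvBStep (0, 0)).1
    rw [pvALoop_char arr hl arr.length 0 0 [] (by omega) hlen h0
      (by intro k; simp; intro hk; subst hk; intro h; exact h0 h)]
    rw [pvB_char arr 0 0]
    -- RHS: filtNZ arr = arr[0] :: filtNZ (drop 1), and pvG 0 (x :: l) = pvG x l
    obtain ⟨x, xs, rfl⟩ : ∃ x xs, arr = x :: xs := by
      cases arr with
      | nil => exact absurd rfl hne
      | cons x xs => exact ⟨x, xs, rfl⟩
    have hx : x ≠ 0 := by simpa using h0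
    have hfc : pvFiltNZ (x :: xs) = x :: pvFiltNZ xs := by
      simp [pvFiltNZ, hx]
    rw [hfc, pvG, if_neg (by simp)]
    simp [List.getD]
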